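-- pv_equiv track=rewrite | github.com/prio101/hackerrank | nested_list.py | SecondMax
-- ===== SOURCE A (Python) =====
-- def SecondMax(arr_list):
--   min_val = arr_list[0][1]
--   second_min_val = 0
--   new_list = []
--   result_list = []
--
--   for item in arr_list:
--     if item[1] != min_val :
--       new_list.append(item)
--
--   second_min_val = new_list[0][1]
--
--   for item in new_list :
--     if item[1] == second_min_val:
--       result_list.append(item)
--
--   return result_list
-- ===== SOURCE B (Python) =====
-- def SecondMax(arr_list):
--     groups = {}
--     for item in arr_list:
--         groups.setdefault(item[1], []).append(item)
--     min_val = arr_list[0][1]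
--     target = [k for k in groups if k != min_val][0]
--     return groups[target]
-- ===== Notes on version B (the rewrite author's own statement) =====
-- stated objective: idiomatic
-- what changed: Instead of A's two filtering passes (collect items whose score differs from the first item's, then re-scan that list for its head's score), B groups all items by score into an insertion-ordered dict in one pass and returns the group of the first score different from the first item's score.
import Mathlib
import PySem

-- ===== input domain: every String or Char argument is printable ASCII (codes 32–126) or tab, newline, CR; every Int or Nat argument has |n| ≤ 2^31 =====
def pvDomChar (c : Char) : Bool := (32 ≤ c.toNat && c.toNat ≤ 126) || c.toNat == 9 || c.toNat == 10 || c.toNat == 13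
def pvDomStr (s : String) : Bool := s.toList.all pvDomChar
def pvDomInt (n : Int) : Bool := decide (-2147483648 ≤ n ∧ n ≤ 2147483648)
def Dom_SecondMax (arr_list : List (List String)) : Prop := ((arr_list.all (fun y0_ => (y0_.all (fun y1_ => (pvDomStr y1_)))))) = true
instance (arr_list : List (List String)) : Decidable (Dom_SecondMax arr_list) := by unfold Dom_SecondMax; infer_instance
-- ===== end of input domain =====

-- B groups items by score into one insertion-ordered dict instead of A's two filtering passes; same
-- O(n) cost, more idiomatic. Equivalence proved on Pre_ (outside it the Python A raises IndexError).


-- ===== PORT A =====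
def SecondMax (arr_list : List (List String)) : List (List String) :=
  let min_val := PySem.List.pyGetD (PySem.List.pyGetD arr_list 0 []) 1 ""
  let new_list := arr_list.foldl
    (fun acc item => if PySem.List.pyGetD item 1 "" ≠ min_val then acc ++ [item] else acc) []
  let second_min_val := PySem.List.pyGetD (PySem.List.pyGetD new_list 0 []) 1 ""
  new_list.foldl
    (fun acc item => if PySem.List.pyGetD item 1 "" = second_min_val then acc ++ [item] else acc) []

-- ===== PORT B =====
-- groups.setdefault(item[1], []).append(item)  ==  groups[item[1]] = groups.get(item[1], []) + [item],
-- i.e. Dict.modify with default [].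
def SecondMax_alt (arr_list : List (List String)) : List (List String) :=
  let groups := arr_list.foldl
    (fun d item => d.modify (PySem.List.pyGetD item 1 "") [] (· ++ [item]))
    (PySem.Dict.empty : PySem.Dict String (List (List String)))
  let min_val := PySem.List.pyGetD (PySem.List.pyGetD arr_list 0 []) 1 ""
  let target := PySem.List.pyGetD (groups.keys.filter (fun k => k ≠ min_val)) 0 ""
  groups.getD target []

-- ===== PRECONDITION & SPEC =====
-- Pre_ excludes exactly the inputs where the Python A raises IndexError: the empty list, an item with
-- fewer than 2 elements, and lists whose items all share the first item's score (B raises there too).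
def Pre_SecondMax (arr_list : List (List String)) : Prop :=
  arr_list ≠ [] ∧ (∀ item ∈ arr_list, 2 ≤ item.length) ∧
    ∃ item ∈ arr_list,
      PySem.List.pyGetD item 1 "" ≠ PySem.List.pyGetD (PySem.List.pyGetD arr_list 0 []) 1 ""
instance (arr_list : List (List String)) : Decidable (Pre_SecondMax arr_list) := by
  unfold Pre_SecondMax; infer_instance

def pvWitness_SecondMax : List (List String) := [["a", "1"], ["b", "2"], ["c", "2"], ["d", "3"]]

def Spec_SecondMax (arr_list : List (List String)) (out : List (List String)) : Prop := out = SecondMax_alt arr_list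
instance (arr_list : List (List String)) (out : List (List String)) : Decidable (Spec_SecondMax arr_list out) := by unfold Spec_SecondMax; infer_instance

-- ===== CLAIM (what is proved, stated in full; the proofs are below) =====
def Claim_equal_SecondMax : Prop := ∀ (arr_list : List (List String)), Dom_SecondMax arr_list → Pre_SecondMax arr_list → Spec_SecondMax arr_list (SecondMax arr_list)

-- ===== LEMMAS AND PROOFS =====

-- the score (item[1]) both programs key on; proof-side abbreviation only
def score (item : List String) : String := PySem.List.pyGetD item 1 ""

-- first element of the ordered dedup differing from m = first element of the list differing from m
theorem head_filter_ofList (m : String) (ys : List String) :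
    ((PySem.Set.ofList ys).filter (fun k => k ≠ m)).head? = (ys.filter (fun k => k ≠ m)).head? := by
  induction ys with
  | nil => rfl
  | cons y ys ih =>
    rw [PySem.Set.ofList_cons]
    by_cases hy : y = m
    · subst hy
      have h1 : ∀ zs : List String, (y :: PySem.Set.discard zs y).filter (fun k => decide (k ≠ y)) =
          zs.filter (fun k => decide (k ≠ y)) := by
        intro zs
        simp only [List.filter_cons, PySem.Set.discard, List.filter_filter]
        rw [if_neg (by simp)]
        apply List.filter_congr
        intro x _
        by_cases hx : x = y <;> simp [hx]
      rw [h1, ih, List.filter_cons, if_neg (by simp)]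
    · rw [List.filter_cons, List.filter_cons, if_pos (by simp [hy]), if_pos (by simp [hy])]
      simp

theorem getD_zero_head (l : List String) (d : String) : l.getD 0 d = (l.head?).getD d := by
  cases l <;> rfl

theorem SecondMax_spec : Claim_equal_SecondMax := by
  intro arr_list _hdom hpre
  obtain ⟨_hne, _hlen, item0, hmem0, hdiff0⟩ := hpre
  unfold Spec_SecondMax SecondMax SecondMax_alt
  simp only []
  set m := PySem.List.pyGetD (PySem.List.pyGetD arr_list 0 []) 1 "" with hm
  -- A's first loop is a filter
  have hfold1 : arr_list.foldl
      (fun acc item => if PySem.List.pyGetD item 1 "" ≠ m then acc ++ [item] else acc) [] =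
      arr_list.filter (fun item => decide (score item ≠ m)) := by
    have := PySem.List.foldl_append_if (fun item => decide (PySem.List.pyGetD item 1 "" ≠ m))
      id arr_list []
    simpa [score] using this
  set nl := arr_list.filter (fun item => decide (score item ≠ m)) with hnl
  have hmemnl : item0 ∈ nl := by
    rw [hnl]; exact List.mem_filter.mpr ⟨hmem0, by simpa [score] using hdiff0⟩
  have hnlne : nl ≠ [] := List.ne_nil_of_mem hmemnl
  obtain ⟨h0, tl, hcons⟩ := List.exists_cons_of_ne_nil hnlne
  have hh0 : h0 ∈ nl := by rw [hcons]; exact List.mem_cons_self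
  have hh0q : score h0 ≠ m := by
    have := (List.mem_filter.mp (hnl ▸ hh0)).2
    simpa using this
  -- A's second_min_val is the score of the first item whose score differs from min_val
  have hsecond : PySem.List.pyGetD (PySem.List.pyGetD nl 0 []) 1 "" = score h0 := by
    rw [PySem.List.pyGetD_zero, hcons]; rfl
  -- A's second loop is a filter
  have hfold2 : nl.foldl
      (fun acc item => if PySem.List.pyGetD item 1 "" = score h0 then acc ++ [item] else acc) [] =
      nl.filter (fun item => decide (score item = score h0)) := by
    have := PySem.List.foldl_append_if (fun item => decide (PySem.List.pyGetD item 1 "" = score h0))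
      id nl []
    simpa [score] using this
  rw [hfold1, hsecond, hfold2]
  set groups := arr_list.foldl
      (fun d item => d.modify (PySem.List.pyGetD item 1 "") [] (· ++ [item]))
      (PySem.Dict.empty : PySem.Dict String (List (List String))) with hg
  -- B's dict keys are the distinct scores in first-occurrence order
  have hkeys : groups.keys = PySem.Set.ofList (arr_list.map score) := by
    have h := PySem.Dict.keys_foldl_modify_key arr_list score []
      (fun _ item => (· ++ [item])) PySem.Dict.empty
    simp only [score] at h
    rw [hg, h, PySem.Dict.keys_empty, PySem.Set.update_nil_left]
  -- B's target key equals A's second_min_val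
  have htarget : PySem.List.pyGetD (groups.keys.filter (fun k => k ≠ m)) 0 "" = score h0 := by
    rw [PySem.List.pyGetD_zero, hkeys, getD_zero_head]
    have h1 : ((PySem.Set.ofList (arr_list.map score)).filter (fun k => k ≠ m)).head? =
        some (score h0) := by
      rw [head_filter_ofList, List.filter_map]
      have h2 : (arr_list.filter ((fun k => decide (k ≠ m)) ∘ score)) = nl := by
        rw [hnl]; rfl
      rw [h2, hcons]
      simp
    rw [h1]; rfl
  rw [htarget]
  -- B's group at the target key is the filter by that score over the whole list
  have hgetD : groups.getD (score h0) [] =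
      arr_list.filter (fun item => score item == score h0) := by
    have h := PySem.Dict.getD_foldl_modify_append
      (arr_list.map (fun i : List String => (score i, i))) PySem.Dict.empty (score h0)
    simp only [List.foldl_map] at h
    simp only [score] at h ⊢
    rw [hg, h, List.filter_map]
    simp [Function.comp_def]
  rw [hgetD]
  -- the two filters agree because the target score differs from min_val
  rw [hnl, List.filter_filter]
  apply List.filter_congr
  intro x _
  by_cases hx : score x = score h0
  · simp [hx, hh0q]
  · simp [hx]
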